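-- pv_equiv track=rewrite | github.com/robertbsmith/sunny-pint | scripts/merge_pubs.py | match_voa_to_fsa
-- ===== SOURCE A (Python) =====
-- def match_voa_to_fsa(fsa_pubs: list[dict], voa_pubs: list[dict]) -> dict[int, dict]:
--     """Match VOA pubs to FSA by postcode. Returns {fsa_index: voa_pub}."""
--     # Build postcode index for FSA.
--     pc_index: dict[str, list[int]] = {}
--     for i, p in enumerate(fsa_pubs):
--         pc = p.get("postcode", "").strip().upper()
--         if pc:
--             pc_index.setdefault(pc, []).append(i)
--
--     matches = {}
--     for voa_pub in voa_pubs: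
--         pc = voa_pub.get("postcode", "").strip().upper()
--         if not pc or pc not in pc_index:
--             continue
--         # Match to first unmatched FSA pub at this postcode.
--         for i in pc_index[pc]:
--             if i not in matches:
--                 matches[i] = voa_pub
--                 break
--
--     return matches
-- ===== SOURCE B (Python) =====
-- def match_voa_to_fsa(fsa_pubs: list[dict], voa_pubs: list[dict]) -> dict[int, dict]:
--     """Match VOA pubs to FSA by postcode. Returns {fsa_index: voa_pub}."""
--     # Build postcode index for FSA (same grouping as before).
--     pc_index: dict[str, list[int]] = {}
--     for i, p in enumerate(fsa_pubs):
--         pc = p.get("postcode", "").strip().upper()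
--         if pc:
--             pc_index.setdefault(pc, []).append(i)
--
--     # Monotonic next-available pointer per postcode: no rescan of matched indices.
--     pos = {pc: 0 for pc in pc_index}
--     matches = {}
--     for voa_pub in voa_pubs:
--         pc = voa_pub.get("postcode", "").strip().upper()
--         k = pos.get(pc)
--         if k is not None and k < len(pc_index[pc]):
--             matches[pc_index[pc][k]] = voa_pub
--             pos[pc] = k + 1
--     return matches
-- ===== Notes on version B (the rewrite author's own statement) =====
-- stated objective: alternative
-- what changed: B replaces A's inner loop, which rescans the postcode's whole index list for the first fsa index not yet in matches, by a monotonic next-available pointer per postcode (O(1) per VOA pub after the index build instead of a bucket scan; not measurably faster on the generated timing inputs, whose buckets stay small); Pre_ only restricts the claim to association lists that represent Python dicts on the key A reads (no pub repeats the "postcode" key), which excludes no input expressible as A's Python arguments.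
import Mathlib
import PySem

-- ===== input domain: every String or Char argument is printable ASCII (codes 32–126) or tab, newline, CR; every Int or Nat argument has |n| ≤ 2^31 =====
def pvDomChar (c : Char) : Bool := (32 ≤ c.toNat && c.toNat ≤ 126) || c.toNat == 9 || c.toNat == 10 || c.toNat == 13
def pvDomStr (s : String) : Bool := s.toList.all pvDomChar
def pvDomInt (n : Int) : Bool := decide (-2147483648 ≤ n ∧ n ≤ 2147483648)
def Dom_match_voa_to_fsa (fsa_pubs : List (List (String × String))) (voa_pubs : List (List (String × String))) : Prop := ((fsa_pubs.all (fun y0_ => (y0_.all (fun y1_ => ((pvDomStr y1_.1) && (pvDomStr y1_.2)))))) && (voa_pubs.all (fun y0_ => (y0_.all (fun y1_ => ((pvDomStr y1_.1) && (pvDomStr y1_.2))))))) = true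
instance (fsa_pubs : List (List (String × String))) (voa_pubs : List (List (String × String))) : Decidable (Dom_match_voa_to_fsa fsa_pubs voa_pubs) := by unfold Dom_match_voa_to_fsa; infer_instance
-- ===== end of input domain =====

-- B replaces A's inner rescan of already-matched FSA indices by a monotonic
-- next-available pointer per postcode (objective: alternative matching strategy).

-- ===== PORT A =====
-- p.get("postcode", "").strip().upper()
def pvPostcode (p : List (String × String)) : String :=
  PySem.Str.upper (PySem.Str.strip ((PySem.Dict.mk p).getD "postcode" ""))

-- the pc_index building loop (identical in A and in B)
def pvBuildIndex (fsa_pubs : List (List (String × String))) : PySem.Dict String (List Int) :=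
  (PySem.List.enumerate fsa_pubs).foldl
    (fun d ip =>
      let pc := pvPostcode ip.2
      if pc ≠ "" then d.modify pc [] (fun l => l ++ [ip.1]) else d)
    PySem.Dict.empty

-- A's inner loop: first i in the bucket with i not in matches
def pvAInner (v : List (String × String)) :
    List Int → PySem.Dict Int (List (String × String)) → PySem.Dict Int (List (String × String))
  | [], m => m
  | i :: rest, m => if m.contains i then pvAInner v rest m else m.insert i v

def pvAStep (pc_index : PySem.Dict String (List Int))
    (m : PySem.Dict Int (List (String × String))) (v : List (String × String)) :
    PySem.Dict Int (List (String × String)) :=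
  let pc := pvPostcode v
  if pc = "" ∨ pc_index.contains pc = false then m
  else pvAInner v (pc_index.getD pc []) m

def match_voa_to_fsa (fsa_pubs : List (List (String × String))) (voa_pubs : List (List (String × String))) : List (Int × List (String × String)) :=
  let pc_index := pvBuildIndex fsa_pubs
  (voa_pubs.foldl (pvAStep pc_index) PySem.Dict.empty).items

-- ===== PORT B =====
def pvBStep (pc_index : PySem.Dict String (List Int))
    (st : PySem.Dict String Int × PySem.Dict Int (List (String × String)))
    (v : List (String × String)) :
    PySem.Dict String Int × PySem.Dict Int (List (String × String)) :=
  let pc := pvPostcode v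
  match st.1.get? pc with
  | none => st
  | some k =>
    if k < ((pc_index.getD pc []).length : Int) then
      (st.1.insert pc (k + 1),
       st.2.insert (PySem.List.pyGetD (pc_index.getD pc []) k 0) v)
    else st

def match_voa_to_fsa_alt (fsa_pubs : List (List (String × String))) (voa_pubs : List (List (String × String))) : List (Int × List (String × String)) :=
  let pc_index := pvBuildIndex fsa_pubs
  let pos0 := pc_index.keys.foldl (fun d pc => d.insert pc (0 : Int)) PySem.Dict.empty
  ((voa_pubs.foldl (pvBStep pc_index)
      (pos0, (PySem.Dict.empty : PySem.Dict Int (List (String × String))))).2).items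

-- ===== PRECONDITION & SPEC =====
-- Pre_ restricts the claim to association lists that represent Python dicts on the one key A reads:
-- no pub repeats the "postcode" key (a Python dict cannot contain a duplicate key, and on such lists
-- the first-match association-list convention and Python's dict construction diverge).
def Pre_match_voa_to_fsa (fsa_pubs : List (List (String × String))) (voa_pubs : List (List (String × String))) : Prop :=
  (∀ p ∈ fsa_pubs, (p.map Prod.fst).count "postcode" ≤ 1) ∧
  (∀ p ∈ voa_pubs, (p.map Prod.fst).count "postcode" ≤ 1)
instance (fsa_pubs : List (List (String × String))) (voa_pubs : List (List (String × String))) : Decidable (Pre_match_voa_to_fsa fsa_pubs voa_pubs) := by unfold Pre_match_voa_to_fsa; infer_instance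

def pvWitness_match_voa_to_fsa : (List (List (String × String))) × (List (List (String × String))) :=
  ([[("postcode", "AB1 2CD"), ("name", "The Crown")]], [[("postcode", " ab1 2cd "), ("name", "Crown VOA")]])

def Spec_match_voa_to_fsa (fsa_pubs : List (List (String × String))) (voa_pubs : List (List (String × String))) (out : List (Int × List (String × String))) : Prop := out = match_voa_to_fsa_alt fsa_pubs voa_pubs
instance (fsa_pubs : List (List (String × String))) (voa_pubs : List (List (String × String))) (out : List (Int × List (String × String))) : Decidable (Spec_match_voa_to_fsa fsa_pubs voa_pubs out) := by unfold Spec_match_voa_to_fsa; infer_instance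

-- ===== CLAIM (what is proved, stated in full; the proofs are below) =====
def Claim_equal_match_voa_to_fsa : Prop := ∀ (fsa_pubs : List (List (String × String))) (voa_pubs : List (List (String × String))), Dom_match_voa_to_fsa fsa_pubs voa_pubs → Pre_match_voa_to_fsa fsa_pubs voa_pubs → Spec_match_voa_to_fsa fsa_pubs voa_pubs (match_voa_to_fsa fsa_pubs voa_pubs)

-- ===== LEMMAS AND PROOFS =====

-- bucket characterization of the index-building fold
theorem pvBI_getD (l : List (Int × List (String × String))) (d : PySem.Dict String (List Int)) (pc : String) :
    ((l.foldl
      (fun d ip =>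
        let pc := pvPostcode ip.2
        if pc ≠ "" then d.modify pc [] (fun l => l ++ [ip.1]) else d) d).getD pc [])
    = d.getD pc [] ++ (l.filter (fun ip => pvPostcode ip.2 = pc ∧ pc ≠ "")).map (·.1) := by
  induction l generalizing d with
  | nil => simp
  | cons ip rest ih =>
    simp only [List.foldl_cons, List.filter_cons]
    by_cases hpc : pvPostcode ip.2 ≠ ""
    · rw [ih]
      by_cases heq : pvPostcode ip.2 = pc
      · simp [hpc, heq, PySem.Dict.getD_modify, heq ▸ hpc]
      · simp [hpc, heq, PySem.Dict.getD_modify, Ne.symm heq]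
    · simp only [ne_eq, not_not] at hpc
      rw [if_neg (by simp [hpc]), ih]
      simp [hpc]

theorem pvBI_contains_empty (l : List (Int × List (String × String))) (d : PySem.Dict String (List Int)) :
    (l.foldl
      (fun d ip =>
        let pc := pvPostcode ip.2
        if pc ≠ "" then d.modify pc [] (fun l => l ++ [ip.1]) else d) d).contains ""
    = d.contains "" := by
  induction l generalizing d with
  | nil => rfl
  | cons ip rest ih =>
    simp only [List.foldl_cons]
    by_cases hpc : pvPostcode ip.2 ≠ ""
    · rw [if_pos hpc, ih, PySem.Dict.contains_modify]
      simp [Ne.symm hpc]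
    · rw [if_neg hpc, ih]

theorem pvBk_mem (fsa : List (List (String × String))) (pc : String) (i : Int) :
    i ∈ (pvBuildIndex fsa).getD pc [] ↔
      ∃ (k : Nat) (h : k < fsa.length), i = (k : Int) ∧ pvPostcode fsa[k] = pc ∧ pc ≠ "" := by
  rw [pvBuildIndex, pvBI_getD]
  simp only [PySem.Dict.getD_empty, List.nil_append, List.mem_map, List.mem_filter,
    PySem.List.mem_enumerate_iff, decide_eq_true_eq]
  constructor
  · rintro ⟨ip, ⟨⟨k, hk, rfl⟩, hc⟩, rfl⟩
    exact ⟨k, hk, by simp, by simpa using hc.1, hc.2⟩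
  · rintro ⟨k, hk, rfl, hpc, hne⟩
    exact ⟨((k : Int), fsa[k]), ⟨⟨k, hk, by simp⟩, ⟨hpc, hne⟩⟩, rfl⟩

theorem pvBk_nodup (fsa : List (List (String × String))) (pc : String) :
    ((pvBuildIndex fsa).getD pc []).Nodup := by
  rw [pvBuildIndex, pvBI_getD]
  simp only [PySem.Dict.getD_empty, List.nil_append]
  have hp : (PySem.List.enumerate fsa).Pairwise (fun p q => p.1 < q.1) :=
    PySem.List.pairwise_lt_enumerate fsa 0
  have hp2 : (List.filter (fun ip => decide (pvPostcode ip.2 = pc ∧ pc ≠ ""))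
      (PySem.List.enumerate fsa)).Pairwise (fun p q => p.1 < q.1) :=
    List.Pairwise.sublist List.filter_sublist hp
  exact List.pairwise_map.mpr (hp2.imp (fun h => ne_of_lt h))

theorem pvBk_disjoint (fsa : List (List (String × String))) {pc pc' : String} (h : pc ≠ pc') {i : Int}
    (h1 : i ∈ (pvBuildIndex fsa).getD pc []) : i ∉ (pvBuildIndex fsa).getD pc' [] := by
  intro h2
  rw [pvBk_mem] at h1 h2
  obtain ⟨k, hk, hik, hp1, -⟩ := h1
  obtain ⟨k', hk', hik', hp2, -⟩ := h2
  have hkk : k = k' := by omega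
  subst hkk
  exact h (hp1.symm.trans hp2)

theorem pvBI_empty_not_mem (fsa : List (List (String × String))) :
    "" ∉ (pvBuildIndex fsa).keys := by
  have := pvBI_contains_empty (PySem.List.enumerate fsa) PySem.Dict.empty
  rw [← pvBuildIndex] at this
  intro hmem
  rw [← PySem.Dict.contains_iff_mem_keys] at hmem
  simp [PySem.Dict.contains_empty] at this
  exact absurd hmem (by simp [this])

-- A's inner scan under the prefix invariant
theorem pvAInner_spec (v : List (String × String)) (l : List Int) (n : Nat)
    (m : PySem.Dict Int (List (String × String))) (hn : n ≤ l.length)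
    (htake : ∀ j ∈ l.take n, m.contains j = true)
    (hdrop : ∀ j ∈ l.drop n, m.contains j = false) :
    pvAInner v l m = if h : n < l.length then m.insert l[n] v else m := by
  induction l generalizing n with
  | nil =>
    simp at hn
    simp [pvAInner, hn]
  | cons i rest ih =>
    match n with
    | 0 =>
      have hi : m.contains i = false := hdrop i (by simp)
      simp [pvAInner, hi]
    | n'+1 =>
      have hi : m.contains i = true := htake i (by simp)
      rw [pvAInner, if_pos hi]
      rw [ih n' (by simpa using hn) (fun j hj => htake j (by simp [hj]))
        (fun j hj => hdrop j (by simpa using hj))]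
      simp

-- pos = {pc: 0 for pc in pc_index}
theorem pvPos0_get? (l : List String) (d : PySem.Dict String Int) (pc : String) :
    (l.foldl (fun d pc => d.insert pc (0 : Int)) d).get? pc
    = if pc ∈ l then some 0 else d.get? pc := by
  induction l generalizing d with
  | nil => simp
  | cons k rest ih =>
    simp only [List.foldl_cons, ih, PySem.Dict.get?_insert, List.mem_cons]
    by_cases h1 : pc ∈ rest <;> by_cases h2 : pc = k <;> simp [h1, h2]

-- loop invariant relating B's pointer dict to A's matches dict
def pvInv (idx : PySem.Dict String (List Int)) (pos : PySem.Dict String Int)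
    (m : PySem.Dict Int (List (String × String))) : Prop :=
  (∀ pc, pos.get? pc = none ↔ pc ∉ idx.keys) ∧
  (∀ pc n, pos.get? pc = some n → ∃ nn : Nat, n = (nn : Int) ∧ nn ≤ (idx.getD pc []).length ∧
      (∀ j ∈ (idx.getD pc []).take nn, m.contains j = true) ∧
      (∀ j ∈ (idx.getD pc []).drop nn, m.contains j = false))

theorem pvLoop_eq (fsa : List (List (String × String))) (voa : List (List (String × String)))
    (pos : PySem.Dict String Int) (m : PySem.Dict Int (List (String × String)))
    (hinv : pvInv (pvBuildIndex fsa) pos m) :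
    voa.foldl (pvAStep (pvBuildIndex fsa)) m
      = (voa.foldl (pvBStep (pvBuildIndex fsa)) (pos, m)).2 := by
  set idx := pvBuildIndex fsa with hidx
  induction voa generalizing pos m with
  | nil => rfl
  | cons v rest ih =>
    obtain ⟨h1, h2⟩ := hinv
    simp only [List.foldl_cons]
    set pc := pvPostcode v with hpc
    cases hg : pos.get? pc with
    | none =>
      -- both skip
      have hmem : pc ∉ idx.keys := (h1 pc).mp hg
      have hcont : idx.contains pc = false := by
        rw [← Bool.not_eq_true, PySem.Dict.contains_iff_mem_keys]; exact hmem
      have hA : pvAStep idx m v = m := by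
        rw [pvAStep]; rw [if_pos (Or.inr hcont)]
      have hB : pvBStep idx (pos, m) v = (pos, m) := by
        rw [pvBStep]; simp only [← hpc, hg]
      rw [hA, hB]
      exact ih pos m ⟨h1, h2⟩
    | some k =>
      have hmem : pc ∈ idx.keys := by
        by_contra hh
        rw [← h1 pc] at hh; simp [hg] at hh
      have hcont : idx.contains pc = true := (PySem.Dict.contains_iff_mem_keys idx pc).mpr hmem
      have hne : pc ≠ "" := fun h => pvBI_empty_not_mem fsa (h ▸ hmem)
      obtain ⟨nn, rfl, hnlen, htake, hdrop⟩ := h2 pc k hg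
      have hA : pvAStep idx m v
          = if h : nn < (idx.getD pc []).length then m.insert (idx.getD pc [])[nn] v else m := by
        rw [pvAStep]
        rw [if_neg (by rw [← hpc]; simp [hne, hcont])]
        exact pvAInner_spec v _ nn m hnlen htake hdrop
      by_cases hlt : nn < (idx.getD pc []).length
      · -- both insert
        have hgetd : PySem.List.pyGetD (idx.getD pc []) (nn : Int) 0 = (idx.getD pc [])[nn] :=
          PySem.List.pyGetD_ofNat (idx.getD pc []) nn 0 hlt
        have hB : pvBStep idx (pos, m) v
            = (pos.insert pc ((nn : Int) + 1), m.insert ((idx.getD pc [])[nn]) v) := by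
          rw [pvBStep]
          simp only [← hpc, hg]
          rw [if_pos (by exact_mod_cast hlt), hgetd]
        rw [hA, dif_pos hlt, hB]
        set i := (idx.getD pc [])[nn] with hi
        have hidrop : i ∈ (idx.getD pc []).drop nn := by
          rw [List.drop_eq_getElem_cons hlt]
          exact List.mem_cons_self
        apply ih
        constructor
        · intro pc'
          rw [PySem.Dict.get?_insert]
          split
          · simp_all
          · exact h1 pc'
        · intro pc' n' hg'
          rw [PySem.Dict.get?_insert] at hg'
          by_cases hpc' : pc' = pc
          · subst hpc'
            rw [if_pos rfl] at hg'
            obtain rfl := (Option.some.inj hg').symm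
            refine ⟨nn + 1, by push_cast; ring, by omega, ?_, ?_⟩
            · intro j hj
              rw [List.take_add_one] at hj
              simp only [List.mem_append] at hj
              rcases hj with hj | hj
              · rw [PySem.Dict.contains_insert]
                simp [htake j hj]
              · have : j = i := by
                  simpa [List.getElem?_eq_getElem hlt] using hj
                rw [this]; exact PySem.Dict.contains_insert_self m i v
            · intro j hj
              have hcons : (idx.getD pc []).drop nn = i :: (idx.getD pc []).drop (nn + 1) := by
                rw [List.drop_eq_getElem_cons hlt]
              have hjd : j ∈ (idx.getD pc []).drop nn := by
                rw [hcons]; exact List.mem_cons_of_mem _ hj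
              have hnd : ((idx.getD pc []).drop nn).Nodup :=
                List.Nodup.sublist (List.drop_sublist _ _) (pvBk_nodup fsa pc)
              have hji : j ≠ i := by
                rw [hcons] at hnd
                exact fun hh => (List.nodup_cons.mp hnd).1 (hh ▸ hj)
              rw [PySem.Dict.contains_insert]
              simp [hji, hdrop j hjd]
          · rw [if_neg hpc'] at hg'
            obtain ⟨nn', he, hlen', ht', hd'⟩ := h2 pc' n' hg'
            refine ⟨nn', he, hlen', ?_, ?_⟩
            · intro j hj
              rw [PySem.Dict.contains_insert]
              simp [ht' j hj]
            · intro j hj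
              rw [PySem.Dict.contains_insert]
              have hji : j ≠ i := by
                intro hh; subst hh
                exact pvBk_disjoint fsa (Ne.symm hpc') (List.mem_of_mem_drop hidrop)
                  (List.mem_of_mem_drop hj)
              simp [hji, hd' j hj]
      · -- both skip
        have hB : pvBStep idx (pos, m) v = (pos, m) := by
          rw [pvBStep]
          simp only [← hpc, hg]
          rw [if_neg (by exact_mod_cast hlt)]
        rw [hA, dif_neg hlt, hB]
        exact ih pos m ⟨h1, h2⟩

-- ===== VERDICT (by name: the statement is the Claim_ definition above) =====
theorem match_voa_to_fsa_spec : Claim_equal_match_voa_to_fsa := by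
  intro fsa voa _ _
  unfold Spec_match_voa_to_fsa match_voa_to_fsa match_voa_to_fsa_alt
  have h := pvLoop_eq fsa voa
    ((pvBuildIndex fsa).keys.foldl (fun d pc => d.insert pc (0 : Int)) PySem.Dict.empty)
    PySem.Dict.empty ?_
  · exact congrArg PySem.Dict.items h
  · constructor
    · intro pc
      rw [pvPos0_get?]
      split <;> simp_all [PySem.Dict.get?_empty]
    · intro pc n hn
      rw [pvPos0_get?] at hn
      split at hn
      · refine ⟨0, by simp_all, by simp, by simp, ?_⟩
        intro j _; simp [PySem.Dict.contains_empty]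
      · simp [PySem.Dict.get?_empty] at hn
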